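-- pv_equiv track=rewrite | github.com/pinetreelch/programmers | LV0./20250212/12_1_유한소수_판별하기.py | solution
-- ===== SOURCE A (Python) =====
-- def solution(a, b):
--     answer = 0
--
--     #기약분수로 만들기
--     for i in range(2, min([a, b]) + 1):
--         while a % i == 0 and b % i == 0:
--             a = a // i
--             b = b // i
--
--     #분모에서 2제거
--     while b % 2 == 0:
--         b = b // 2
--
--     #분모에서 5제거
--     while b % 5 == 0:
--         b = b // 5
--
--     #2랑 5를 제거했을때 몫이 1만 남았으면 유한소수
--     if b == 1:
--         answer = 1
--     #1, 2, 5를 제외한 어떤 숫자가 있으면 무한소수임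
--     else:
--         answer = 2
--     return answer
-- ===== SOURCE B (Python) =====
-- def _gcd(x, y):
--     while y:
--         x, y = y, x % y
--     return x
--
--
-- def _strip(n, p):
--     while n % p == 0:
--         n //= p
--     return n
--
--
-- def solution(a, b):
--     # reduce to lowest terms with Euclid's gcd (only meaningful for positive inputs)
--     if a > 0 and b > 0:
--         b //= _gcd(a, b)
--     # denominator is terminating iff only factors 2 and 5 remain
--     b = _strip(_strip(b, 2), 5)
--     return 1 if b == 1 else 2
-- ===== Notes on version B (the rewrite author's own statement) =====
-- stated objective: faster
-- what changed: Replaces A's trial division over every i in 2..min(a,b) by Euclid's gcd to reduce the fraction, and factors the two copy-pasted 2/5-stripping loops into one generic strip helper.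
import Mathlib
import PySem

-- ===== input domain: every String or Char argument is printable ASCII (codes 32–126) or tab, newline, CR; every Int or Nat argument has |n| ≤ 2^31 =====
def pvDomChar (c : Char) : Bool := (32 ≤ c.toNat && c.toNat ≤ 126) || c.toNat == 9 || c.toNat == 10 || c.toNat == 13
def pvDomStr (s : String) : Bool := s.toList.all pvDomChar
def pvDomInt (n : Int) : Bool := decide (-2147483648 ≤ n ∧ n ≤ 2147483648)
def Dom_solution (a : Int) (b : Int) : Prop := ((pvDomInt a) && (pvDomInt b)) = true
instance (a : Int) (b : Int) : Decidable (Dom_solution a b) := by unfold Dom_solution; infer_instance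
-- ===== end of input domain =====

-- B replaces A's trial-division reduction over every i in 2..min(a,b) by Euclid's gcd
-- (measured faster in a timing run) and factors the two 2/5-stripping loops into one helper.
-- All while-loops are ported with an explicit fuel argument as a totality guard only: inside
-- Pre_solution the fuel chosen at each call site is enough for the loop to reach its Python exit
-- condition (proved in the lemmas below).

-- ===== PORT A =====

-- inner 'while a % i == 0 and b % i == 0: a //= i; b //= i'
def innerA : Nat → Int → Int → Int → Int × Int
  | 0, _, a, b => (a, b)
  | f + 1, i, a, b =>
    if PySem.Int.mod a i = 0 ∧ PySem.Int.mod b i = 0 then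
      innerA f i (PySem.Int.floordiv a i) (PySem.Int.floordiv b i)
    else (a, b)

-- 'for i in range(2, min([a, b]) + 1): …'
def loopA : List Int → Int → Int → Int × Int
  | [], a, b => (a, b)
  | i :: is, a, b =>
    let p := innerA b.natAbs i a b
    loopA is p.1 p.2

-- 'while b % 2 == 0: b //= 2'  (Python diverges at b = 0, which Pre_solution excludes)
def strip2A : Nat → Int → Int
  | 0, b => b
  | f + 1, b => if PySem.Int.mod b 2 = 0 then strip2A f (PySem.Int.floordiv b 2) else b

-- 'while b % 5 == 0: b //= 5'
def strip5A : Nat → Int → Int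
  | 0, b => b
  | f + 1, b => if PySem.Int.mod b 5 = 0 then strip5A f (PySem.Int.floordiv b 5) else b

def solution (a : Int) (b : Int) : Int :=
  let p := loopA (PySem.List.pyRange 2 (min a b + 1) 1) a b
  let b2 := strip2A p.2.natAbs p.2
  let b3 := strip5A b2.natAbs b2
  if b3 = 1 then 1 else 2

-- ===== PORT B =====

-- '_gcd(x, y): while y: x, y = y, x % y; return x'
def euclidB : Nat → Int → Int → Int
  | 0, x, _ => x
  | f + 1, x, y => if y ≠ 0 then euclidB f y (PySem.Int.mod x y) else x

-- '_strip(n, p): while n % p == 0: n //= p; return n'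
def stripB : Nat → Int → Int → Int
  | 0, n, _ => n
  | f + 1, n, p => if PySem.Int.mod n p = 0 then stripB f (PySem.Int.floordiv n p) p else n

def solution_alt (a : Int) (b : Int) : Int :=
  let b1 := if a > 0 ∧ b > 0 then PySem.Int.floordiv b (euclidB (b.natAbs + 1) a b) else b
  let b2 := stripB b1.natAbs b1 2
  if stripB b2.natAbs b2 5 = 1 then 1 else 2

-- ===== PRECONDITION & SPEC =====
-- Pre_ excludes exactly b = 0, on which Python A never returns (the 'while b % 2 == 0'
-- loop runs forever there); B's Python also loops forever there.
def Pre_solution (a : Int) (b : Int) : Prop := b ≠ 0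
instance (a : Int) (b : Int) : Decidable (Pre_solution a b) := by unfold Pre_solution; infer_instance
def pvWitness_solution : Int × Int := (6, 35)

def Spec_solution (a : Int) (b : Int) (out : Int) : Prop := out = solution_alt a b
instance (a : Int) (b : Int) (out : Int) : Decidable (Spec_solution a b out) := by unfold Spec_solution; infer_instance

-- ===== CLAIM (what is proved, stated in full; the proofs are below) =====
def Claim_equal_solution : Prop := ∀ (a : Int) (b : Int), Dom_solution a b → Pre_solution a b → Spec_solution a b (solution a b)

-- ===== LEMMAS AND PROOFS =====

theorem innerA_spec : ∀ (f : Nat) (i a b : Int), b.natAbs ≤ f → 2 ≤ i → 0 < a → 0 < b →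
    (∃ c : Int, 0 < c ∧ a = c * (innerA f i a b).1 ∧ b = c * (innerA f i a b).2) ∧
    0 < (innerA f i a b).1 ∧ 0 < (innerA f i a b).2 ∧
    ¬(i ∣ (innerA f i a b).1 ∧ i ∣ (innerA f i a b).2) := by
  intro f
  induction f with
  | zero => intro i a b hf hi ha hb; omega
  | succ f ih =>
    intro i a b hf hi ha hb
    rw [innerA]
    split
    · rename_i h
      obtain ⟨hma, hmb⟩ := h
      obtain ⟨ka, hka⟩ := (PySem.Int.mod_eq_zero_iff_dvd a i).mp hma
      obtain ⟨kb, hkb⟩ := (PySem.Int.mod_eq_zero_iff_dvd b i).mp hmb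
      have hfa : PySem.Int.floordiv a i = ka := by
        rw [PySem.Int.floordiv_eq_ediv_of_pos (by omega), hka,
          Int.mul_ediv_cancel_left _ (by omega)]
      have hfb : PySem.Int.floordiv b i = kb := by
        rw [PySem.Int.floordiv_eq_ediv_of_pos (by omega), hkb,
          Int.mul_ediv_cancel_left _ (by omega)]
      have hka0 : 0 < ka := by nlinarith
      have hkb0 : 0 < kb := by nlinarith
      have h2kb : 2 * kb ≤ b := by nlinarith
      rw [hfa, hfb]
      obtain ⟨⟨c, hc, hc1, hc2⟩, hr1, hr2, hnd⟩ :=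
        ih i ka kb (by omega) hi hka0 hkb0
      exact ⟨⟨i * c, by positivity, by linear_combination hka + i * hc1,
        by linear_combination hkb + i * hc2⟩, hr1, hr2, hnd⟩
    · rename_i h
      refine ⟨⟨1, one_pos, (one_mul a).symm, (one_mul b).symm⟩, ha, hb, ?_⟩
      rintro ⟨hda, hdb⟩
      exact h ⟨(PySem.Int.mod_eq_zero_iff_dvd a i).mpr hda,
        (PySem.Int.mod_eq_zero_iff_dvd b i).mpr hdb⟩

theorem loopA_spec : ∀ (L : List Int) (a b : Int), (∀ i ∈ L, 2 ≤ i) → 0 < a → 0 < b →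
    (∃ c : Int, 0 < c ∧ a = c * (loopA L a b).1 ∧ b = c * (loopA L a b).2) ∧
    0 < (loopA L a b).1 ∧ 0 < (loopA L a b).2 ∧
    ∀ j ∈ L, ¬(j ∣ (loopA L a b).1 ∧ j ∣ (loopA L a b).2) := by
  intro L
  induction L with
  | nil =>
    intro a b _ ha hb
    exact ⟨⟨1, one_pos, (one_mul a).symm, (one_mul b).symm⟩, ha, hb, by simp⟩
  | cons i is ihL =>
    intro a b hL ha hb
    have hi : 2 ≤ i := hL i (by simp)
    obtain ⟨⟨c1, hc1, hc11, hc12⟩, hm1, hm2, hnd⟩ :=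
      innerA_spec b.natAbs i a b le_rfl hi ha hb
    obtain ⟨⟨c2, hc2, hc21, hc22⟩, hr1, hr2, hrest⟩ :=
      ihL (innerA b.natAbs i a b).1 (innerA b.natAbs i a b).2
        (fun j hj => hL j (by simp [hj])) hm1 hm2
    have hloop : loopA (i :: is) a b
        = loopA is (innerA b.natAbs i a b).1 (innerA b.natAbs i a b).2 := rfl
    rw [hloop]
    refine ⟨⟨c1 * c2, by positivity, by linear_combination hc11 + c1 * hc21,
      by linear_combination hc12 + c1 * hc22⟩, hr1, hr2, ?_⟩
    intro j hj
    rcases List.mem_cons.mp hj with rfl | hj'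
    · rintro ⟨hd1, hd2⟩
      exact hnd ⟨hc21 ▸ Dvd.dvd.mul_left hd1 c2, hc22 ▸ Dvd.dvd.mul_left hd2 c2⟩
    · exact hrest j hj'

-- after A's reduction loop the pair is coprime, so the divider is exactly gcd a b
theorem loopA_gcd (a b : Int) (ha : 0 < a) (hb : 0 < b) :
    b = (Int.gcd a b : Int) * (loopA (PySem.List.pyRange 2 (min a b + 1) 1) a b).2 := by
  set L := PySem.List.pyRange 2 (min a b + 1) 1 with hLdef
  have hmem : ∀ i ∈ L, 2 ≤ i := by
    intro i hi
    exact ((PySem.List.mem_pyRange_one).mp hi).1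
  obtain ⟨⟨c, hc, hc1, hc2⟩, hr1, hr2, hnd⟩ := loopA_spec L a b hmem ha hb
  set r := loopA L a b
  have hgr : Int.gcd r.1 r.2 = 1 := by
    by_contra hne
    have hg1 : 1 ≤ Int.gcd r.1 r.2 := Nat.one_le_iff_ne_zero.mpr (by
      simp [Int.gcd_eq_zero_iff]; omega)
    have hg2 : 2 ≤ (Int.gcd r.1 r.2 : Int) := by exact_mod_cast by omega
    set j : Int := (Int.gcd r.1 r.2 : Int) with hj
    have hd1 : j ∣ r.1 := by rw [hj]; exact Int.gcd_dvd_left r.1 r.2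
    have hd2 : j ∣ r.2 := by rw [hj]; exact Int.gcd_dvd_right r.1 r.2
    have hja : j ∣ a := hc1 ▸ Dvd.dvd.mul_left hd1 c
    have hjb : j ∣ b := hc2 ▸ Dvd.dvd.mul_left hd2 c
    have hjla : j ≤ a := Int.le_of_dvd ha hja
    have hjlb : j ≤ b := Int.le_of_dvd hb hjb
    have hjmem : j ∈ L := by
      rw [hLdef, PySem.List.mem_pyRange_one]
      exact ⟨by omega, by omega⟩
    exact hnd j hjmem ⟨hd1, hd2⟩
  have hgab : Int.gcd a b = c.natAbs * Int.gcd r.1 r.2 := by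
    rw [hc1, hc2, Int.gcd_mul_left]
  have hcn : (c.natAbs : Int) = c := Int.natAbs_of_nonneg (by omega)
  rw [hgab, hgr, Nat.mul_one, hcn]
  exact hc2

theorem euclidB_eq_gcd : ∀ (f : Nat) (x y : Int), y.natAbs < f → 0 ≤ x → 0 ≤ y →
    euclidB f x y = (Int.gcd x y : Int) := by
  intro f
  induction f with
  | zero => intro x y hf hx hy; omega
  | succ f ih =>
    intro x y hf hx hy
    rw [euclidB]
    split
    · rename_i h
      have hypos : 0 < y := lt_of_le_of_ne hy (Ne.symm h)
      have hmod : PySem.Int.mod x y = x % y := PySem.Int.mod_eq_emod_of_pos hypos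
      have h1 : 0 ≤ x % y := Int.emod_nonneg x h
      have h2 : x % y < y := Int.emod_lt_of_pos x hypos
      rw [hmod, ih y (x % y) (by omega) hy h1]
      congr 1
      rw [Int.emod_def, Int.gcd_sub_mul_left_right, Int.gcd_comm]
    · rename_i h
      have hy0 : y = 0 := by omega
      subst hy0
      rw [Int.gcd_zero_right, Int.natAbs_of_nonneg hx]

theorem strip2_eq : ∀ (fA : Nat) (b : Int) (fB : Nat), b ≠ 0 → b.natAbs ≤ fA → b.natAbs ≤ fB →
    strip2A fA b = stripB fB b 2 := by
  intro fA
  induction fA with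
  | zero => intro b fB h0 hA hB; omega
  | succ fA ih =>
    intro b fB h0 hA hB
    cases fB with
    | zero => omega
    | succ fB =>
      rw [strip2A, stripB]
      by_cases h : PySem.Int.mod b 2 = 0
      · obtain ⟨k, hk⟩ := (PySem.Int.mod_eq_zero_iff_dvd b 2).mp h
        have hfd : PySem.Int.floordiv b 2 = k := by
          rw [PySem.Int.floordiv_eq_ediv_of_pos (by omega), hk,
            Int.mul_ediv_cancel_left _ (by omega)]
        rw [if_pos h, if_pos h, hfd]
        exact ih k fB (by omega) (by omega) (by omega)
      · rw [if_neg h, if_neg h]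

theorem strip5_eq : ∀ (fA : Nat) (b : Int) (fB : Nat), b ≠ 0 → b.natAbs ≤ fA → b.natAbs ≤ fB →
    strip5A fA b = stripB fB b 5 := by
  intro fA
  induction fA with
  | zero => intro b fB h0 hA hB; omega
  | succ fA ih =>
    intro b fB h0 hA hB
    cases fB with
    | zero => omega
    | succ fB =>
      rw [strip5A, stripB]
      by_cases h : PySem.Int.mod b 5 = 0
      · obtain ⟨k, hk⟩ := (PySem.Int.mod_eq_zero_iff_dvd b 5).mp h
        have hfd : PySem.Int.floordiv b 5 = k := by
          rw [PySem.Int.floordiv_eq_ediv_of_pos (by omega), hk,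
            Int.mul_ediv_cancel_left _ (by omega)]
        rw [if_pos h, if_pos h, hfd]
        exact ih k fB (by omega) (by omega) (by omega)
      · rw [if_neg h, if_neg h]

theorem strip2A_ne_zero : ∀ (f : Nat) (b : Int), b ≠ 0 → strip2A f b ≠ 0 := by
  intro f
  induction f with
  | zero => intro b h0; exact h0
  | succ f ih =>
    intro b h0
    rw [strip2A]
    by_cases h : PySem.Int.mod b 2 = 0
    · obtain ⟨k, hk⟩ := (PySem.Int.mod_eq_zero_iff_dvd b 2).mp h
      have hfd : PySem.Int.floordiv b 2 = k := by
        rw [PySem.Int.floordiv_eq_ediv_of_pos (by omega), hk,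
          Int.mul_ediv_cancel_left _ (by omega)]
      rw [if_pos h, hfd]
      exact ih k (by rintro rfl; simp at hk; omega)
    · rw [if_neg h]; exact h0

-- the common tail of both programs: strip 2s then 5s and compare with 1
theorem tail_eq (b : Int) (h0 : b ≠ 0) :
    (if strip5A (strip2A b.natAbs b).natAbs (strip2A b.natAbs b) = 1 then (1:Int) else 2)
      = (if stripB (stripB b.natAbs b 2).natAbs (stripB b.natAbs b 2) 5 = 1 then (1:Int) else 2) := by
  have h2 : strip2A b.natAbs b = stripB b.natAbs b 2 :=
    strip2_eq b.natAbs b b.natAbs h0 le_rfl le_rfl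
  have hnz : strip2A b.natAbs b ≠ 0 := strip2A_ne_zero b.natAbs b h0
  rw [strip5_eq (strip2A b.natAbs b).natAbs (strip2A b.natAbs b)
    (strip2A b.natAbs b).natAbs hnz le_rfl le_rfl, h2]

-- ===== VERDICT (by name: the statement is the Claim_ definition above) =====
theorem solution_spec : Claim_equal_solution := by
  intro a b _ hpre
  unfold Spec_solution solution solution_alt
  by_cases hpos : 0 < a ∧ 0 < b
  · obtain ⟨ha, hb⟩ := hpos
    have hkey := loopA_gcd a b ha hb
    set r := loopA (PySem.List.pyRange 2 (min a b + 1) 1) a b with hr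
    set g : Int := (Int.gcd a b : Int) with hgdef
    have hgpos : 0 < g := by
      have : Int.gcd a b ≠ 0 := by simp [Int.gcd_eq_zero_iff]; omega
      rw [hgdef]; exact_mod_cast Nat.pos_of_ne_zero this
    have hb1 : (if a > 0 ∧ b > 0 then PySem.Int.floordiv b (euclidB (b.natAbs + 1) a b) else b)
        = r.2 := by
      rw [if_pos ⟨ha, hb⟩, euclidB_eq_gcd (b.natAbs + 1) a b (by omega) (by omega) (by omega),
        ← hgdef, PySem.Int.floordiv_eq_ediv_of_pos hgpos, hkey,
        Int.mul_ediv_cancel_left _ (by omega)]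
    obtain ⟨-, -, hr2, -⟩ := loopA_spec (PySem.List.pyRange 2 (min a b + 1) 1) a b
      (fun i hi => ((PySem.List.mem_pyRange_one).mp hi).1) ha hb
    rw [← hr] at hr2
    simp only [hb1]
    exact tail_eq r.2 (by omega)
  · have hcond : ¬(a > 0 ∧ b > 0) := hpos
    have hempty : PySem.List.pyRange 2 (min a b + 1) 1 = [] := by
      apply PySem.List.pyRange_one_eq_nil
      have hmin : min a b ≤ a ∧ min a b ≤ b := ⟨min_le_left a b, min_le_right a b⟩
      rcases not_and_or.mp hpos with h | h <;> omega
    rw [hempty, if_neg hcond]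
    show (if strip5A (strip2A (loopA [] a b).2.natAbs (loopA [] a b).2).natAbs
        (strip2A (loopA [] a b).2.natAbs (loopA [] a b).2) = 1 then (1:Int) else 2) = _
    have hB : (loopA [] a b).2 = b := rfl
    rw [hB]
    exact tail_eq b hpre
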